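-- pv_equiv track=rewrite | github.com/Roc-Mun/CookAi | app/ingredient_match.py | lines_from_ingredient_block
-- ===== SOURCE A (Python) =====
-- def lines_from_ingredient_block(block: str) -> list[str]:
--     lines = []
--     for line in block.splitlines():
--         line = line.strip()
--         if not line:
--             continue
--         low = line.lower()
--         if low.startswith("tiempo") or low.startswith("dificultad"):
--             break
--         lines.append(line)
--     return lines
-- ===== SOURCE B (Python) =====
-- def lines_from_ingredient_block(block: str) -> list[str]:
--     # Staged: strip all lines once, locate the cut index of the first
--     # non-empty stop line, slice up to it, then drop empty lines.
--     stripped = [l.strip() for l in block.splitlines()]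
--     cut = next(
--         (i for i, l in enumerate(stripped)
--          if l and (l.lower().startswith("tiempo") or l.lower().startswith("dificultad"))),
--         len(stripped),
--     )
--     return [l for l in stripped[:cut] if l]
-- ===== Notes on version B (the rewrite author's own statement) =====
-- stated objective: alternative
-- what changed: Replaces A's single accumulator loop with continue/break by staged passes: strip all lines, find the cut index of the first non-empty stop line, slice up to it, then filter out empty lines.
import Mathlib
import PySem

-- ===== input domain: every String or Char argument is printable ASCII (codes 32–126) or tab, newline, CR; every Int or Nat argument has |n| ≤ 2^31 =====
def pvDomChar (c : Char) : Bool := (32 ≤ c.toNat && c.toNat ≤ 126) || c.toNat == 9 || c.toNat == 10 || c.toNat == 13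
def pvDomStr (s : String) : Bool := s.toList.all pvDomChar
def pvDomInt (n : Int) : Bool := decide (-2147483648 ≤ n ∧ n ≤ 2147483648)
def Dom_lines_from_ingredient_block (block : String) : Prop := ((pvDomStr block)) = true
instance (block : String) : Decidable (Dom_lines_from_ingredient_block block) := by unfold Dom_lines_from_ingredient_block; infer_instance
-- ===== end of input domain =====

-- B replaces A's one-pass accumulator loop by staged passes: strip all lines, find the
-- cut index of the first non-empty stop line, slice up to it, filter out empties (same cost).

-- ===== PORT A =====
-- the for-loop of A: accumulator `lines`, `continue` on empty, `break` on the stop keywords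
def pvLoopA (ls : List String) (lines : List String) : List String :=
  match ls with
  | [] => lines
  | line :: rest =>
    let line := PySem.Str.strip line
    if line.toList = [] then pvLoopA rest lines            -- if not line: continue
    else
      let low := PySem.Str.lower line
      if PySem.Str.startswith low "tiempo" || PySem.Str.startswith low "dificultad" then lines  -- break
      else pvLoopA rest (lines ++ [line])                  -- lines.append(line)

def lines_from_ingredient_block (block : String) : List String :=
  pvLoopA (PySem.Str.splitlines block) []

-- ===== PORT B =====
-- the generator's condition: non-empty AND lowercased line starts with a stop keyword
def pvIsCut (l : String) : Bool :=
  !l.toList.isEmpty &&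
    (PySem.Str.startswith (PySem.Str.lower l) "tiempo"
      || PySem.Str.startswith (PySem.Str.lower l) "dificultad")

def lines_from_ingredient_block_alt (block : String) : List String :=
  let stripped := (PySem.Str.splitlines block).map PySem.Str.strip
  let cut := (stripped.findIdx? pvIsCut).getD stripped.length
  (stripped.take cut).filter (fun l => !l.toList.isEmpty)

-- ===== PRECONDITION & SPEC =====
def Spec_lines_from_ingredient_block (block : String) (out : List String) : Prop := out = lines_from_ingredient_block_alt block
instance (block : String) (out : List String) : Decidable (Spec_lines_from_ingredient_block block out) := by unfold Spec_lines_from_ingredient_block; infer_instance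

-- ===== CLAIM (what is proved, stated in full; the proofs are below) =====
def Claim_equal_lines_from_ingredient_block : Prop := ∀ (block : String), Dom_lines_from_ingredient_block block → Spec_lines_from_ingredient_block block (lines_from_ingredient_block block)

-- ===== LEMMAS AND PROOFS =====
-- B's result, as a function of the list of stripped lines
def pvCutRes (t : List String) : List String :=
  (t.take ((t.findIdx? pvIsCut).getD t.length)).filter (fun l => !l.toList.isEmpty)

theorem pvCutRes_cons (s : String) (t : List String) :
    pvCutRes (s :: t) =
      if pvIsCut s then []
      else if s.toList.isEmpty then pvCutRes t else s :: pvCutRes t := by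
  unfold pvCutRes
  rw [List.findIdx?_cons]
  by_cases h : pvIsCut s
  · simp [h]
  · simp only [h, if_false, Bool.false_eq_true, if_neg (by simp [h] : ¬ (pvIsCut s = true))]
    cases hf : t.findIdx? pvIsCut with
    | none =>
      simp only [hf, Option.map_none, Option.getD_none, List.length_cons]
      rw [List.take_succ_cons, List.filter_cons]
      cases he : s.toList.isEmpty <;> simp [he]
    | some i =>
      simp only [hf, Option.map_some, Option.getD_some]
      rw [List.take_succ_cons, List.filter_cons]
      cases he : s.toList.isEmpty <;> simp [he]

theorem pvLoopA_eq (ls acc : List String) :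
    pvLoopA ls acc = acc ++ pvCutRes (ls.map PySem.Str.strip) := by
  induction ls generalizing acc with
  | nil => simp [pvLoopA, pvCutRes]
  | cons l rest ih =>
    rw [pvLoopA, List.map_cons, pvCutRes_cons]
    by_cases h : (PySem.Str.strip l).toList = []
    · have he : (PySem.Str.strip l).toList.isEmpty = true := by rw [h]; rfl
      have hc : pvIsCut (PySem.Str.strip l) = false := by unfold pvIsCut; rw [he]; rfl
      rw [if_pos h, hc, if_neg (by simp), if_pos he]
      exact ih acc
    · have he : (PySem.Str.strip l).toList.isEmpty = false := by
        cases hx : (PySem.Str.strip l).toList with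
        | nil => exact absurd hx h
        | cons a t => rfl
      rw [if_neg h]
      by_cases hs : (PySem.Str.startswith (PySem.Str.lower (PySem.Str.strip l)) "tiempo"
          || PySem.Str.startswith (PySem.Str.lower (PySem.Str.strip l)) "dificultad") = true
      · have hc : pvIsCut (PySem.Str.strip l) = true := by unfold pvIsCut; rw [he, hs]; rfl
        rw [if_pos hs, hc, if_pos rfl, List.append_nil]
      · have hc : pvIsCut (PySem.Str.strip l) = false := by
          unfold pvIsCut; rw [he, Bool.eq_false_iff.mpr hs]; rfl
        rw [if_neg hs, hc, if_neg (by simp), if_neg (by rw [he]; exact Bool.false_ne_true), ih, List.append_assoc]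
        rfl

-- ===== VERDICT (by name: the statement is the Claim_ definition above) =====
theorem lines_from_ingredient_block_spec : Claim_equal_lines_from_ingredient_block := by
  intro block _
  unfold Spec_lines_from_ingredient_block lines_from_ingredient_block lines_from_ingredient_block_alt
  simpa [pvCutRes] using pvLoopA_eq (PySem.Str.splitlines block) []
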